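-- pv_equiv track=rewrite | github.com/dustycodes/Algorithms-UofU | PS9/rainbow.py | compute_penalties
-- ===== SOURCE A (Python) =====
-- def compute_penalties(distances, n, cache):
--     if n in cache.keys():
--         return cache[n]
--
--     cost = (400 - distances[n]) ** 2
--     min_cost = cost
--     #i = n - 1
--     i = 1
--     #while i > 0:
--     while i < n:
--         dist = distances[n] - distances[i]
--         cost = (400 - dist) ** 2
--         cost = cost + compute_penalties(distances, i, cache)
--         min_cost = min(min_cost, cost)
--         #i -= 1
--         i += 1
--
--     cache[n] = min_cost
--     return min_cost
-- ===== SOURCE B (Python) =====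
-- def compute_penalties(distances, n, cache):
--     if n in cache:
--         return cache[n]
--     for k in list(range(1, n)) + [n]:
--         if k in cache:
--             continue
--         best = (400 - distances[k]) ** 2
--         for i in range(1, k):
--             best = min(best, (400 - (distances[k] - distances[i])) ** 2 + cache[i])
--         cache[k] = best
--     return cache[n]
-- ===== Notes on version B (the rewrite author's own statement) =====
-- stated objective: alternative
-- what changed: Replaced A's top-down memoized recursion (recursive calls threading the cache, plus a fuel-free call stack of depth n) by an iterative bottom-up DP: one pass over indices 1..n that fills the cache table in order, with no recursion.
import Mathlib
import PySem

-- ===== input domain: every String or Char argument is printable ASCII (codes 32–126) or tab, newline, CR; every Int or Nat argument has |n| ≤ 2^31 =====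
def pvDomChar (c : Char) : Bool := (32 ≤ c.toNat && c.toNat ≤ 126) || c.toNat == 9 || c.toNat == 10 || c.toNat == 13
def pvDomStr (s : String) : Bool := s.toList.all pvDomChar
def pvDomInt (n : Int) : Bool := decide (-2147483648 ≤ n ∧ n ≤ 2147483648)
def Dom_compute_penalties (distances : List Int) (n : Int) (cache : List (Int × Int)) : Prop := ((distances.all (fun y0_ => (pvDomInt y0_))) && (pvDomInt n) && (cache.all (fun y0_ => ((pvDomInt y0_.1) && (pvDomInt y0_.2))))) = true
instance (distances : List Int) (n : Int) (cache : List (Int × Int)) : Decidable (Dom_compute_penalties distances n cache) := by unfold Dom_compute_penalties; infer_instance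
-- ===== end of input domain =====

-- B replaces A's memoized recursion by an iterative bottom-up DP loop over the indices 1..n
-- (objective: alternative / idiomatic; same asymptotic cost). Both A and B mutate the Python
-- `cache` dict identically (proved here only about the RETURN value; the Python B performs
-- the same insertions as A except that neither touches the cache when n is already cached).

-- ===== PORT A =====
-- A's recursion, cache threaded through; fuel = n.toNat + 1 bounds the recursion depth
-- (each recursive call is at a strictly smaller nonnegative index, so fuel never runs out
-- on inputs admitted by Pre_; the fuel-0 branch is unreachable there).
mutual
def pvWhileA (distances : List Int) (fuel : Nat) (dn : Int) (is : List Int)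
    (min_cost : Int) (cache : PySem.Dict Int Int) : Int × PySem.Dict Int Int :=
  match is with
  | [] => (min_cost, cache)
  | i :: rest =>
    let dist := dn - PySem.List.pyGetD distances i 0
    let cost := (400 - dist) ^ 2
    let r := pvRecA distances fuel i cache
    pvWhileA distances fuel dn rest (min min_cost (cost + r.1)) r.2
termination_by (fuel, is.length + 1)

def pvRecA (distances : List Int) (fuel : Nat) (n : Int) (cache : PySem.Dict Int Int) :
    Int × PySem.Dict Int Int :=
  match fuel with
  | 0 => (0, cache)
  | fuel' + 1 =>
    match cache.get? n with
    | some v => (v, cache)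
    | none =>
      let cost := (400 - PySem.List.pyGetD distances n 0) ^ 2
      let r := pvWhileA distances fuel' (PySem.List.pyGetD distances n 0)
                 (PySem.List.pyRange 1 n 1) cost cache
      (r.1, r.2.insert n r.1)
termination_by (fuel, 0)
end

def compute_penalties (distances : List Int) (n : Int) (cache : List (Int × Int)) : Int :=
  (pvRecA distances (n.toNat + 1) n (PySem.Dict.ofList cache)).1

-- ===== PORT B =====
-- B's inner loop: best penalty for index k given the table of indices below k.
def pvBestB (distances : List Int) (c : PySem.Dict Int Int) (k : Int) : Int :=
  (PySem.List.pyRange 1 k 1).foldl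
    (fun best i =>
      min best ((400 - (PySem.List.pyGetD distances k 0 - PySem.List.pyGetD distances i 0)) ^ 2
        + c.getD i 0))
    ((400 - PySem.List.pyGetD distances k 0) ^ 2)

-- B's loop body: skip already-cached indices, otherwise record the best penalty.
def pvStepB (distances : List Int) (c : PySem.Dict Int Int) (k : Int) : PySem.Dict Int Int :=
  if c.contains k then c else c.insert k (pvBestB distances c k)

def compute_penalties_alt (distances : List Int) (n : Int) (cache : List (Int × Int)) : Int :=
  let c := PySem.Dict.ofList cache
  if c.contains n then c.getD n 0
  else ((PySem.List.pyRange 1 n 1 ++ [n]).foldl (pvStepB distances) c).getD n 0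

-- ===== PRECONDITION & SPEC =====
-- A returns normally iff n is already a key of cache (immediate hit) or n is a valid
-- (possibly negative) index into distances; otherwise distances[n] raises IndexError.
def Pre_compute_penalties (distances : List Int) (n : Int) (cache : List (Int × Int)) : Prop :=
  (PySem.Dict.ofList cache).contains n = true ∨ PySem.Raise.InRange distances.length n
instance (distances : List Int) (n : Int) (cache : List (Int × Int)) :
    Decidable (Pre_compute_penalties distances n cache) := by
  unfold Pre_compute_penalties; infer_instance

def pvWitness_compute_penalties : List Int × Int × (List (Int × Int)) := ([500, 300, 350], 2, [])

def Spec_compute_penalties (distances : List Int) (n : Int) (cache : List (Int × Int)) (out : Int) : Prop := out = compute_penalties_alt distances n cache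
instance (distances : List Int) (n : Int) (cache : List (Int × Int)) (out : Int) : Decidable (Spec_compute_penalties distances n cache out) := by unfold Spec_compute_penalties; infer_instance

-- ===== CLAIM (what is proved, stated in full; the proofs are below) =====
def Claim_equal_compute_penalties : Prop := ∀ (distances : List Int) (n : Int) (cache : List (Int × Int)), Dom_compute_penalties distances n cache → Pre_compute_penalties distances n cache → Spec_compute_penalties distances n cache (compute_penalties distances n cache)

-- ===== LEMMAS AND PROOFS =====

-- What A's recursion produces, phrased with B's building blocks: on a cache miss it is
-- exactly B's table built over 1..n-1 followed by the insertion of n's best value.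
def pvRunA (distances : List Int) (n : Int) (c : PySem.Dict Int Int) :
    Int × PySem.Dict Int Int :=
  match c.get? n with
  | some v => (v, c)
  | none =>
    let cf := (PySem.List.pyRange 1 n 1).foldl (pvStepB distances) c
    (pvBestB distances cf n, cf.insert n (pvBestB distances cf n))

lemma pv_step_contains_self (ds : List Int) (c : PySem.Dict Int Int) (k : Int) :
    (pvStepB ds c k).contains k = true := by
  unfold pvStepB; split_ifs with h
  · exact h
  · exact PySem.Dict.contains_insert_self _ _ _

lemma pv_step_contains_of_true (ds : List Int) (c : PySem.Dict Int Int) (k j : Int)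
    (h : c.contains j = true) : (pvStepB ds c k).contains j = true := by
  unfold pvStepB; split_ifs with hk
  · exact h
  · simp [PySem.Dict.contains_insert, h]

lemma pv_step_get?_of_contains (ds : List Int) (c : PySem.Dict Int Int) (k j : Int)
    (h : c.contains j = true) : (pvStepB ds c k).get? j = c.get? j := by
  unfold pvStepB; split_ifs with hk
  · rfl
  · have hne : j ≠ k := by rintro rfl; rw [h] at hk; exact hk rfl
    exact PySem.Dict.get?_insert_of_ne _ _ hne

lemma pv_fold_get?_of_contains (ds : List Int) :
    ∀ (ks : List Int) (c : PySem.Dict Int Int) (j : Int), c.contains j = true →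
      (ks.foldl (pvStepB ds) c).get? j = c.get? j ∧
      (ks.foldl (pvStepB ds) c).contains j = true := by
  intro ks
  induction ks with
  | nil => intro c j h; exact ⟨rfl, h⟩
  | cons k ks ih =>
    intro c j h
    have h' := pv_step_contains_of_true ds c k j h
    have := ih (pvStepB ds c k) j h'
    exact ⟨this.1.trans (pv_step_get?_of_contains ds c k j h), this.2⟩

lemma pv_fold_contains_false (ds : List Int) :
    ∀ (ks : List Int) (c : PySem.Dict Int Int) (j : Int),
      c.contains j = false → j ∉ ks → (ks.foldl (pvStepB ds) c).contains j = false := by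
  intro ks
  induction ks with
  | nil => intro c j h _; exact h
  | cons k ks ih =>
    intro c j h hmem
    have hne : j ≠ k := fun hjk => hmem (hjk ▸ List.mem_cons_self)
    have h' : (pvStepB ds c k).contains j = false := by
      unfold pvStepB; split_ifs with hk
      · exact h
      · simp [PySem.Dict.contains_insert, h, hne]
    exact ih _ j h' (fun hm => hmem (List.mem_cons_of_mem _ hm))

lemma pv_fold_id (ds : List Int) :
    ∀ (ks : List Int) (c : PySem.Dict Int Int),
      (∀ j ∈ ks, c.contains j = true) → ks.foldl (pvStepB ds) c = c := by
  intro ks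
  induction ks with
  | nil => intro c _; rfl
  | cons k ks ih =>
    intro c h
    have hstep : pvStepB ds c k = c := by
      unfold pvStepB; simp [h k List.mem_cons_self]
    rw [List.foldl_cons, hstep]
    exact ih c (fun j hj => h j (List.mem_cons_of_mem _ hj))

-- On a saturated-below-i cache, one call of A's recursion is exactly one step of B's loop.
lemma pv_recA_eq_step (ds : List Int) (fuel : Nat) (i : Int) (c : PySem.Dict Int Int)
    (hIH : ∀ (m : Int) (c' : PySem.Dict Int Int), m.toNat < fuel →
      (c'.contains m = true ∨ PySem.Raise.InRange ds.length m) →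
      pvRecA ds fuel m c' = pvRunA ds m c')
    (hf : i.toNat < fuel)
    (hpre : c.contains i = true ∨ PySem.Raise.InRange ds.length i)
    (hsat : ∀ j, 1 ≤ j → j < i → c.contains j = true) :
    pvRecA ds fuel i c = ((pvStepB ds c i).getD i 0, pvStepB ds c i) := by
  rw [hIH i c hf hpre]
  unfold pvRunA
  cases hget : c.get? i with
  | some v =>
    have hc : c.contains i = true := by
      rw [PySem.Dict.contains_eq_isSome_get?, hget]; rfl
    simp only [pvStepB, hc, if_true]
    simp [PySem.Dict.getD_eq_get?_getD, hget]
  | none =>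
    have hc : c.contains i = false := by
      rw [PySem.Dict.contains_eq_isSome_get?, hget]; rfl
    have hid : (PySem.List.pyRange 1 i 1).foldl (pvStepB ds) c = c := by
      apply pv_fold_id
      intro j hj
      have := (PySem.List.mem_pyRange_one).mp hj
      exact hsat j this.1 this.2
    simp only [hid, pvStepB, hc, Bool.false_eq_true, if_false]
    simp [PySem.Dict.getD_insert_self]

-- A's while loop over i = lo .. n-1 computes B's min-fold and B's table fold.
lemma pv_whileA_spec (ds : List Int) (fuel : Nat) (n dn : Int)
    (hn : n ≤ (ds.length : Int)) (hfuel : n.toNat ≤ fuel)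
    (hIH : ∀ (m : Int) (c' : PySem.Dict Int Int), m.toNat < fuel →
      (c'.contains m = true ∨ PySem.Raise.InRange ds.length m) →
      pvRecA ds fuel m c' = pvRunA ds m c') :
    ∀ (k : Nat) (i : Int) (c : PySem.Dict Int Int) (mc : Int),
      (n - i).toNat = k → 1 ≤ i →
      (∀ j, 1 ≤ j → j < i → c.contains j = true) →
      pvWhileA ds fuel dn (PySem.List.pyRange i n 1) mc c =
        ((PySem.List.pyRange i n 1).foldl
            (fun b j => min b ((400 - (dn - PySem.List.pyGetD ds j 0)) ^ 2 +
                ((PySem.List.pyRange i n 1).foldl (pvStepB ds) c).getD j 0)) mc,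
         (PySem.List.pyRange i n 1).foldl (pvStepB ds) c) := by
  intro k
  induction k with
  | zero =>
    intro i c mc hk _ _
    have hni : n ≤ i := by omega
    rw [PySem.List.pyRange_one_eq_nil hni]
    simp only [List.foldl_nil]
    rw [pvWhileA]
  | succ k ih =>
    intro i c mc hk hi hsat
    have hin : i < n := by omega
    rw [PySem.List.pyRange_one_cons hin]
    have hfi : i.toNat < fuel := by omega
    have hprei : c.contains i = true ∨ PySem.Raise.InRange ds.length i := by
      right
      constructor
      · omega
      · omega
    have hrec := pv_recA_eq_step ds fuel i c hIH hfi hprei hsat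
    set c' := pvStepB ds c i with hc'
    have hsat' : ∀ j, 1 ≤ j → j < i + 1 → c'.contains j = true := by
      intro j hj1 hj2
      by_cases hji : j = i
      · exact hji ▸ pv_step_contains_self ds c i
      · exact pv_step_contains_of_true ds c i j (hsat j hj1 (by omega))
    have hrest := ih (i + 1) c' (min mc ((400 - (dn - PySem.List.pyGetD ds i 0)) ^ 2 +
        c'.getD i 0)) (by omega) (by omega) hsat'
    show pvWhileA ds fuel dn (i :: PySem.List.pyRange (i + 1) n 1) mc c = _
    rw [pvWhileA, hrec]
    simp only [List.foldl_cons]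
    rw [hrest]
    -- the very first lookup: i's value is unchanged by the later insertions
    have hcont : c'.contains i = true := pv_step_contains_self ds c i
    have hstable := (pv_fold_get?_of_contains ds (PySem.List.pyRange (i + 1) n 1) c' i hcont).1
    have hgetD : ((PySem.List.pyRange (i + 1) n 1).foldl (pvStepB ds) c').getD i 0
        = c'.getD i 0 := by
      rw [PySem.Dict.getD_eq_get?_getD, hstable, ← PySem.Dict.getD_eq_get?_getD]
    rw [hgetD]

lemma pv_recA_spec (ds : List Int) :
    ∀ (fuel : Nat) (n : Int) (c : PySem.Dict Int Int), n.toNat < fuel →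
      (c.contains n = true ∨ PySem.Raise.InRange ds.length n) →
      pvRecA ds fuel n c = pvRunA ds n c := by
  intro fuel
  induction fuel with
  | zero => intro n c h; omega
  | succ fuel' ih =>
    intro n c hf hpre
    rw [pvRecA]
    cases hget : c.get? n with
    | some v => simp [pvRunA, hget]
    | none =>
      have hc : c.contains n = false := by
        rw [PySem.Dict.contains_eq_isSome_get?, hget]; rfl
      have hrange : PySem.Raise.InRange ds.length n := by
        rcases hpre with h | h
        · rw [hc] at h; cases h
        · exact h
      have hwhile := pv_whileA_spec ds fuel' n (PySem.List.pyGetD ds n 0)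
        (by exact_mod_cast le_of_lt hrange.2) (by omega) ih
        ((n - 1).toNat) 1 c ((400 - PySem.List.pyGetD ds n 0) ^ 2) rfl (le_refl 1)
        (fun j hj1 hj2 => absurd (lt_of_le_of_lt hj1 hj2) (lt_irrefl 1))
      simp only [hwhile, pvRunA, hget, pvBestB]

-- ===== VERDICT (by name: the statement is the Claim_ definition above) =====
theorem compute_penalties_spec : Claim_equal_compute_penalties := by
  intro distances n cache _ hpre
  unfold Spec_compute_penalties compute_penalties compute_penalties_alt
  set c := PySem.Dict.ofList cache with hc
  have hspec := pv_recA_spec distances (n.toNat + 1) n c (by omega) hpre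
  rw [hspec]
  by_cases hcont : c.contains n = true
  · obtain ⟨v, hget⟩ : ∃ v, c.get? n = some v := by
      rw [PySem.Dict.contains_eq_isSome_get?] at hcont
      exact Option.isSome_iff_exists.mp hcont
    simp only [pvRunA, hget, hcont, if_true]
    simp [PySem.Dict.getD_eq_get?_getD, hget]
  · have hcf : c.contains n = false := by
      cases h : c.contains n
      · rfl
      · exact absurd h hcont
    have hget : c.get? n = none := by
      rw [PySem.Dict.get?_eq_none_iff_contains]; exact hcf
    have hnotmem : n ∉ PySem.List.pyRange 1 n 1 := by
      intro hmem
      have := (PySem.List.mem_pyRange_one).mp hmem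
      omega
    have hcfcont : ((PySem.List.pyRange 1 n 1).foldl (pvStepB distances) c).contains n = false :=
      pv_fold_contains_false distances _ c n hcf hnotmem
    simp only [pvRunA, hget, hcf, Bool.false_eq_true, if_false, List.foldl_append,
      List.foldl_cons, List.foldl_nil, pvStepB, hcfcont]
    simp [PySem.Dict.getD_insert_self]
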